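-- pv_equiv track=rewrite | github.com/afs-eng/neuro | apps/tests/wais3/interpreters.py | _describe_profile_variability
-- ===== SOURCE A (Python) =====
-- def _get_score_value(score_dict: dict) -> int | None:
--     if score_dict is None:
--         return None
--     value = score_dict.get("pontuacao_composta")
--     if value is None:
--         value = score_dict.get("valor")
--     if isinstance(value, (int, float)):
--         return int(value)
--     return None
--
-- def _describe_profile_variability(scores: dict) -> str:
--     values = [
--         _get_score_value(v)
--         for v in scores.values()
--         if v is not None and _get_score_value(v) is not None
--     ]
--     if not values:
--         return "com variações não especificadas"
--     spread = max(values) - min(values)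
--     if spread <= 9:
--         return "relativamente homogêneo"
--     if spread <= 14:
--         return "com variações discretas"
--     if spread <= 22:
--         return "heterogêneo"
--     return "acentuadamente heterogêneo"
-- ===== SOURCE B (Python) =====
-- def _get_score_value(score_dict):
--     if score_dict is None:
--         return None
--     value = score_dict.get("pontuacao_composta")
--     if value is None:
--         value = score_dict.get("valor")
--     return int(value) if isinstance(value, (int, float)) else None
--
--
-- def _describe_profile_variability(scores):
--     # Anchor-deviation algorithm: fix the FIRST valid score as an anchor and
--     # track the largest deviation above it (up) and below it (down); the
--     # spread is up + down, since max(vs) - min(vs) = (max - a) + (a - min).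
--     # The label is then picked from a threshold table, not an if-chain.
--     state = None  # (anchor, up, down)
--     for v in scores.values():
--         val = _get_score_value(v)
--         if val is None:
--             continue
--         if state is None:
--             state = (val, 0, 0)
--         else:
--             a, up, down = state
--             state = (a, max(up, val - a), max(down, a - val))
--     if state is None:
--         return "com variações não especificadas"
--     spread = state[1] + state[2]
--     for limit, label in ((9, "relativamente homogêneo"),
--                          (14, "com variações discretas"),
--                          (22, "heterogêneo")):
--         if spread <= limit:
--             return label
--     return "acentuadamente heterogêneo"
-- ===== Notes on version B (the rewrite author's own statement) =====
-- stated objective: alternative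
-- what changed: Spread is computed by an anchor-deviation pass (largest deviation above plus largest deviation below the first valid score, never maintaining min/max of the values or a collected list), and the label is picked from a threshold table instead of an if-chain.
import Mathlib
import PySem

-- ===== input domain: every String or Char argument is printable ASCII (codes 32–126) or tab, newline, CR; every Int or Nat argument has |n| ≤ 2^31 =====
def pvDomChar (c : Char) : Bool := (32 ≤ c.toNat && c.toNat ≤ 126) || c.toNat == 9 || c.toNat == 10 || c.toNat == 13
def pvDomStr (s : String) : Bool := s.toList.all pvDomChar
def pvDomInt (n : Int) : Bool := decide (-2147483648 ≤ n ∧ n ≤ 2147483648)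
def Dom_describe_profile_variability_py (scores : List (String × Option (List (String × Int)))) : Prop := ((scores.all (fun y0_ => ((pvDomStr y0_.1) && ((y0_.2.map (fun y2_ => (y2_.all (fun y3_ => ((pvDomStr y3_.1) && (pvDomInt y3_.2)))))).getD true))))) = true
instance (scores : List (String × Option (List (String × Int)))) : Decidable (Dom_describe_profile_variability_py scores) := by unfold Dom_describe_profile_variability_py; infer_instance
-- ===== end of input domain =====

-- B computes the spread by an anchor-deviation pass (max deviation above + below the first valid score) and picks the label from a threshold table; alternative algorithm, same cost.


-- ===== PORT A =====
-- _get_score_value: None dict -> None; else "pontuacao_composta", falling back to "valor";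
-- all dict values are Int here, so the isinstance(int,float) test always succeeds on a found value.
def pvGetScoreValue (score_dict : Option (List (String × Int))) : Option Int :=
  match score_dict with
  | none => none
  | some d =>
    match PySem.Dict.get? (PySem.Dict.mk d) "pontuacao_composta" with
    | some v => some v
    | none =>
      match PySem.Dict.get? (PySem.Dict.mk d) "valor" with
      | some v => some v
      | none => none

def describe_profile_variability_py (scores : List (String × Option (List (String × Int)))) : String :=
  -- [ _get_score_value(v) for v in scores.values() if v is not None and _get_score_value(v) is not None ]
  -- (pvGetScoreValue none = none, so the 'v is not None' guard is absorbed by the filterMap)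
  let values : List Int := (scores.map Prod.snd).filterMap pvGetScoreValue
  match values with
  | [] => "com variações não especificadas"
  | x :: t =>
    let spread : Int := (PySem.List.max? (x :: t) (fun y => y)).getD 0 - (PySem.List.min? (x :: t) (fun y => y)).getD 0
    if spread ≤ 9 then "relativamente homogêneo"
    else if spread ≤ 14 then "com variações discretas"
    else if spread ≤ 22 then "heterogêneo"
    else "acentuadamente heterogêneo"

-- ===== PORT B =====
-- one fold step of B: state = none | some (anchor, up, down)
def pvStepB (st : Option (Int × Int × Int)) (kv : String × Option (List (String × Int))) : Option (Int × Int × Int) :=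
  match pvGetScoreValue kv.2 with
  | none => st
  | some val =>
    match st with
    | none => some (val, 0, 0)
    | some (a, up, down) => some (a, max up (val - a), max down (a - val))

-- the threshold table scan: first limit with spread ≤ limit wins, else the default
def pvPick (spread : Int) : List (Int × String) → String
  | [] => "acentuadamente heterogêneo"
  | (limit, label) :: rest => if spread ≤ limit then label else pvPick spread rest

def describe_profile_variability_py_alt (scores : List (String × Option (List (String × Int)))) : String :=
  match scores.foldl pvStepB none with
  | none => "com variações não especificadas"
  | some (_, up, down) =>
    pvPick (up + down)
      [(9, "relativamente homogêneo"), (14, "com variações discretas"), (22, "heterogêneo")]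

-- ===== PRECONDITION & SPEC =====
def Spec_describe_profile_variability_py (scores : List (String × Option (List (String × Int)))) (out : String) : Prop := out = describe_profile_variability_py_alt scores
instance (scores : List (String × Option (List (String × Int)))) (out : String) : Decidable (Spec_describe_profile_variability_py scores out) := by unfold Spec_describe_profile_variability_py; infer_instance

-- ===== CLAIM (what is proved, stated in full; the proofs are below) =====
def Claim_equal_describe_profile_variability_py : Prop := ∀ (scores : List (String × Option (List (String × Int)))), Dom_describe_profile_variability_py scores → Spec_describe_profile_variability_py scores (describe_profile_variability_py scores)

-- ===== LEMMAS AND PROOFS =====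

-- values extracted by A's comprehension, as a function of the input
def pvVals (scores : List (String × Option (List (String × Int)))) : List Int :=
  (scores.map Prod.snd).filterMap pvGetScoreValue

lemma pvVals_cons (kv : String × Option (List (String × Int))) (l : List (String × Option (List (String × Int)))) :
    pvVals (kv :: l) = match pvGetScoreValue kv.2 with
      | none => pvVals l
      | some x => x :: pvVals l := by
  simp only [pvVals, List.map_cons, List.filterMap_cons]
  cases pvGetScoreValue kv.2 <;> rfl

lemma pvFold_some (l : List (String × Option (List (String × Int)))) (a up down : Int) :
    l.foldl pvStepB (some (a, up, down)) =
      some (a, (pvVals l).foldl (fun u v => max u (v - a)) up,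
               (pvVals l).foldl (fun d v => max d (a - v)) down) := by
  induction l generalizing up down with
  | nil => simp [pvVals]
  | cons kv t ih =>
    rw [pvVals_cons]
    cases h : pvGetScoreValue kv.2 with
    | none => simpa [pvStepB, h] using ih up down
    | some x => simpa [pvStepB, h] using ih (max up (x - a)) (max down (a - x))

lemma pvFold_none (l : List (String × Option (List (String × Int)))) :
    l.foldl pvStepB none = match pvVals l with
      | [] => none
      | x :: t => some (x, t.foldl (fun u v => max u (v - x)) 0,
                           t.foldl (fun d v => max d (x - v)) 0) := by
  induction l with
  | nil => simp [pvVals]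
  | cons kv t ih =>
    rw [pvVals_cons]
    cases h : pvGetScoreValue kv.2 with
    | none => simpa [pvStepB, h] using ih
    | some x => simp [pvStepB, h, pvFold_some]

lemma pvUp_eq (x : Int) (t : List Int) (u : Int) :
    t.foldl (fun u v => max u (v - x)) u = t.foldl max (u + x) - x := by
  induction t generalizing u with
  | nil => simp
  | cons v t ih =>
    simp only [List.foldl_cons]
    rw [ih]
    congr 1
    congr 1
    omega

lemma pvDown_eq (x : Int) (t : List Int) (d : Int) :
    t.foldl (fun d v => max d (x - v)) d = x - t.foldl min (x - d) := by
  induction t generalizing d with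
  | nil => simp
  | cons v t ih =>
    simp only [List.foldl_cons]
    rw [ih]
    congr 1
    congr 1
    omega

-- ===== VERDICT (by name: the statement is the Claim_ definition above) =====
theorem describe_profile_variability_py_spec : Claim_equal_describe_profile_variability_py := by
  intro scores _
  show describe_profile_variability_py scores = describe_profile_variability_py_alt scores
  unfold describe_profile_variability_py describe_profile_variability_py_alt
  rw [pvFold_none]
  show (match pvVals scores with
    | [] => _
    | x :: t => _) = _
  cases h : pvVals scores with
  | nil => rfl
  | cons x t =>
    simp only [PySem.List.max?_id_cons, PySem.List.min?_id_cons, Option.getD_some,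
      pvUp_eq, pvDown_eq, pvPick]
    have : t.foldl max (0 + x) - x + (x - t.foldl min (x - 0)) =
        t.foldl max x - t.foldl min x := by norm_num
    rw [this]
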